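-- pv_equiv track=rewrite | github.com/memedanslortie/BigData_Project | benchmark/scripts/plot.py | compute_pareto_frontier
-- ===== SOURCE A (Python) =====
-- def compute_pareto_frontier(recalls, qps_values):
--     pareto_indices = []
--     n = len(recalls)
--
--     for i in range(n):
--         is_dominated = False
--         for j in range(n):
--             if i != j:
--                 if ((recalls[j] >= recalls[i] and qps_values[j] > qps_values[i]) or
--                     (recalls[j] > recalls[i] and qps_values[j] >= qps_values[i])):
--                     is_dominated = True
--                     break
--         if not is_dominated:
--             pareto_indices.append(i)
--
--     return pareto_indices
-- ===== SOURCE B (Python) =====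
-- def compute_pareto_frontier(recalls, qps_values):
--     n = len(recalls)
--     # best[r] = max qps among points with recall r
--     best = {}
--     for i in range(n):
--         r = recalls[i]
--         q = qps_values[i]
--         b = best.get(r)
--         best[r] = q if b is None or q > b else b
--     # strict[r] = max qps among points with recall strictly greater than r (None if none)
--     strict = {}
--     m = None
--     for r in sorted(best, reverse=True):
--         strict[r] = m
--         b = best[r]
--         if m is None or b > m:
--             m = b
--     out = []
--     for i in range(n):
--         q = qps_values[i]
--         s = strict[recalls[i]]
--         if q == best[recalls[i]] and (s is None or q > s):
--             out.append(i)
--     return out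
-- ===== Notes on version B (the rewrite author's own statement) =====
-- stated objective: faster
-- what changed: Replaced the all-pairs domination test with a hash grouping of max qps per recall plus one descending sort of the distinct recalls and a prefix strict-max sweep; a point is kept iff its qps equals its recall group's max and strictly exceeds the max qps over strictly greater recalls.
-- outside the precondition, e.g. on compute_pareto_frontier([5], []): A returns [0], B raises IndexError
import Mathlib
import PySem

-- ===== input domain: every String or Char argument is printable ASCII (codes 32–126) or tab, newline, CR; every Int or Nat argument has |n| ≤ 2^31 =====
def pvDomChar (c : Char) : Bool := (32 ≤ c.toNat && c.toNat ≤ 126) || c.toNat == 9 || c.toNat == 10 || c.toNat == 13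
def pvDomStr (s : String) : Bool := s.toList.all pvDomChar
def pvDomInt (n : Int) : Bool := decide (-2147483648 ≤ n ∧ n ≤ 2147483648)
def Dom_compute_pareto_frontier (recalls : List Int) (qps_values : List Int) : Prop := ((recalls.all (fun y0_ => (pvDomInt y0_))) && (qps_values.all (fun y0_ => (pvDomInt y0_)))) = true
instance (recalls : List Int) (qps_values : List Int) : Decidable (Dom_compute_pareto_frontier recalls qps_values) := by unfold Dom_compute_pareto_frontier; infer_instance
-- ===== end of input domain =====

-- B replaces A's quadratic all-pairs domination test by a per-recall max-qps grouping dict,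
-- one descending sort of the distinct recalls and a prefix strict-max sweep (O(n log n)).

-- shared indexing helper: xs[i] (indices used are always in range under Pre_)
def pvGetI (xs : List Int) (i : Int) : Int := PySem.List.pyGetD xs i 0

-- ===== PORT A =====
def compute_pareto_frontier (recalls : List Int) (qps_values : List Int) : List Int :=
  let n : Int := recalls.length
  (PySem.List.pyRange 0 n 1).foldl (fun acc i =>
    let is_dominated :=
      (PySem.List.pyRange 0 n 1).any (fun j =>
        decide (i ≠ j) &&
        ((decide (pvGetI recalls j ≥ pvGetI recalls i) && decide (pvGetI qps_values j > pvGetI qps_values i)) ||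
         (decide (pvGetI recalls j > pvGetI recalls i) && decide (pvGetI qps_values j ≥ pvGetI qps_values i))))
    if is_dominated then acc else acc ++ [i]) []

-- ===== PORT B =====
def compute_pareto_frontier_alt (recalls : List Int) (qps_values : List Int) : List Int :=
  let n : Int := recalls.length
  let best : PySem.Dict Int Int :=
    (PySem.List.pyRange 0 n 1).foldl (fun d i =>
      d.insert (pvGetI recalls i)
        (match d.get? (pvGetI recalls i) with
         | none => pvGetI qps_values i
         | some b => if pvGetI qps_values i > b then pvGetI qps_values i else b)) PySem.Dict.empty
  let sm :=
    (PySem.List.sorted best.keys (fun x => x) true).foldl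
      (fun (sm : PySem.Dict Int (Option Int) × Option Int) k =>
        (sm.1.insert k sm.2,
         some (match sm.2 with
               | none => best.getD k 0
               | some mv => if best.getD k 0 > mv then best.getD k 0 else mv)))
      (PySem.Dict.empty, none)
  (PySem.List.pyRange 0 n 1).foldl (fun acc i =>
    if pvGetI qps_values i == best.getD (pvGetI recalls i) 0 &&
       (match sm.1.getD (pvGetI recalls i) none with
        | none => true
        | some mv => decide (pvGetI qps_values i > mv))
    then acc ++ [i] else acc) []

-- ===== PRECONDITION & SPEC =====
-- Pre_ excludes mismatched-length inputs: there Python A in general raises IndexError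
-- (and where short-circuiting lets A accidentally return, B's IndexError is the natural behaviour).
def Pre_compute_pareto_frontier (recalls : List Int) (qps_values : List Int) : Prop :=
  recalls.length ≤ qps_values.length
instance (recalls : List Int) (qps_values : List Int) : Decidable (Pre_compute_pareto_frontier recalls qps_values) := by unfold Pre_compute_pareto_frontier; infer_instance
def pvWitness_compute_pareto_frontier : List Int × List Int := ([1, 2, 1], [5, 3, 4])

def Spec_compute_pareto_frontier (recalls : List Int) (qps_values : List Int) (out : List Int) : Prop := out = compute_pareto_frontier_alt recalls qps_values
instance (recalls : List Int) (qps_values : List Int) (out : List Int) : Decidable (Spec_compute_pareto_frontier recalls qps_values out) := by unfold Spec_compute_pareto_frontier; infer_instance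

-- ===== CLAIM (what is proved, stated in full; the proofs are below) =====
def Claim_equal_compute_pareto_frontier : Prop := ∀ (recalls : List Int) (qps_values : List Int), Dom_compute_pareto_frontier recalls qps_values → Pre_compute_pareto_frontier recalls qps_values → Spec_compute_pareto_frontier recalls qps_values (compute_pareto_frontier recalls qps_values)

-- ===== LEMMAS AND PROOFS =====

-- abbreviations for the two coordinate accessors
def pvR (recalls : List Int) (i : Int) : Int := pvGetI recalls i
def pvQ (qps_values : List Int) (i : Int) : Int := pvGetI qps_values i

-- running optional max
def ocomb (o : Option Int) (v : Int) : Option Int :=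
  some (match o with | none => v | some b => if v > b then v else b)
def omax (o : Option Int) (vs : List Int) : Option Int := vs.foldl ocomb o

theorem omax_eq_none_iff (o : Option Int) (vs : List Int) :
    omax o vs = none ↔ o = none ∧ vs = [] := by
  induction vs generalizing o with
  | nil => simp [omax]
  | cons v vs ih =>
    constructor
    · intro h
      have h' : omax (ocomb o v) vs = none := h
      have := (ih (ocomb o v)).mp h'
      simp [ocomb] at this
    · rintro ⟨_, h⟩
      cases h

theorem omax_base_le (w : Int) (vs : List Int) (m : Int) (h : omax (some w) vs = some m) :
    w ≤ m := by
  induction vs generalizing w with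
  | nil => simp [omax] at h; omega
  | cons v vs ih =>
    have h' : omax (some (if v > w then v else w)) vs = some m := h
    have := ih _ h'
    split at this <;> omega

theorem omax_le (o : Option Int) (vs : List Int) (m : Int) (h : omax o vs = some m) :
    ∀ v ∈ vs, v ≤ m := by
  induction vs generalizing o with
  | nil => simp
  | cons v vs ih =>
    intro u hu
    have h' : omax (ocomb o v) vs = some m := h
    rcases List.mem_cons.mp hu with rfl | hu'
    · have hc : ∃ c, ocomb o u = some c ∧ u ≤ c := by
        cases o with
        | none => exact ⟨u, rfl, le_refl u⟩
        | some b => refine ⟨if u > b then u else b, rfl, ?_⟩; split <;> omega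
      obtain ⟨c, hc1, hc2⟩ := hc
      rw [hc1] at h'
      have := omax_base_le c vs m h'
      omega
    · exact ih (ocomb o v) h' u hu' 

theorem omax_attained (o : Option Int) (vs : List Int) (m : Int) (h : omax o vs = some m) :
    o = some m ∨ m ∈ vs := by
  induction vs generalizing o with
  | nil => left; exact h
  | cons v vs ih =>
    have h' : omax (ocomb o v) vs = some m := h
    rcases ih (ocomb o v) h' with hh | hh
    · cases o with
      | none =>
        right
        simp only [ocomb, Option.some.injEq] at hh
        simp [← hh]
      | some b =>
        simp only [ocomb, Option.some.injEq] at hh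
        split at hh
        · right; simp [← hh]
        · left; rw [hh]
    · right; exact List.mem_cons_of_mem _ hh

-- the best-dict fold, named for the proofs (definitionally the one in the port)
def bstep (recalls qps_values : List Int) (d : PySem.Dict Int Int) (i : Int) : PySem.Dict Int Int :=
  d.insert (pvGetI recalls i)
    (match d.get? (pvGetI recalls i) with
     | none => pvGetI qps_values i
     | some b => if pvGetI qps_values i > b then pvGetI qps_values i else b)

def bestOf (recalls qps_values : List Int) : PySem.Dict Int Int :=
  (PySem.List.pyRange 0 (recalls.length : Int) 1).foldl (bstep recalls qps_values) PySem.Dict.empty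

theorem bstep_fold_get? (recalls qps_values : List Int) (L : List Int) (d : PySem.Dict Int Int) (x : Int) :
    (L.foldl (bstep recalls qps_values) d).get? x
      = omax (d.get? x) ((L.filter (fun i => pvGetI recalls i = x)).map (pvGetI qps_values)) := by
  induction L generalizing d with
  | nil => simp [omax]
  | cons i L ih =>
    simp only [List.foldl_cons, List.filter_cons]
    rw [ih]
    by_cases hx : pvGetI recalls i = x
    · have h1 : (bstep recalls qps_values d i).get? x = ocomb (d.get? x) (pvGetI qps_values i) := by
        simp [bstep, hx, PySem.Dict.get?_insert_self, ocomb]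
      rw [h1]
      simp [hx, omax]
    · have h1 : (bstep recalls qps_values d i).get? x = d.get? x := by
        simp only [bstep]
        rw [PySem.Dict.get?_insert, if_neg (fun h => hx (Eq.symm h))]
      rw [h1]
      simp [hx]

theorem bestOf_get? (recalls qps_values : List Int) (x : Int) :
    (bestOf recalls qps_values).get? x
      = omax none (((PySem.List.pyRange 0 (recalls.length : Int) 1).filter
          (fun i => pvGetI recalls i = x)).map (pvGetI qps_values)) := by
  rw [bestOf, bstep_fold_get?]
  simp [PySem.Dict.get?_empty]

theorem bestOf_nodup_keys (recalls qps_values : List Int) :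
    (bestOf recalls qps_values).keys.Nodup := by
  exact PySem.Dict.nodup_keys_foldl_insert_key _ _ _ _ PySem.Dict.nodup_keys_empty

-- the strict fold
def sstep (best : PySem.Dict Int Int)
    (sm : PySem.Dict Int (Option Int) × Option Int) (k : Int) :
    PySem.Dict Int (Option Int) × Option Int :=
  (sm.1.insert k sm.2,
   some (match sm.2 with
         | none => best.getD k 0
         | some mv => if best.getD k 0 > mv then best.getD k 0 else mv))

theorem sstep_fold_untouched (best : PySem.Dict Int Int) (ks : List Int)
    (s : PySem.Dict Int (Option Int)) (m : Option Int) (x : Int) (hx : x ∉ ks) :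
    ((ks.foldl (sstep best) (s, m)).1).get? x = s.get? x := by
  induction ks generalizing s m with
  | nil => rfl
  | cons k rest ih =>
    have hxk : x ≠ k := fun h => hx (h ▸ List.mem_cons_self)
    have hxr : x ∉ rest := fun h => hx (List.mem_cons_of_mem _ h)
    simp only [List.foldl_cons]
    rw [ih _ _ hxr]
    simp only [sstep]
    rw [PySem.Dict.get?_insert, if_neg hxk]

theorem sstep_fold_get? (best : PySem.Dict Int Int) (ks : List Int) (hnd : ks.Nodup)
    (s : PySem.Dict Int (Option Int)) (m : Option Int) (x : Int) (hx : x ∈ ks) :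
    ((ks.foldl (sstep best) (s, m)).1).get? x
      = some (omax m ((ks.takeWhile (fun k => k ≠ x)).map (fun k => best.getD k 0))) := by
  induction ks generalizing s m with
  | nil => cases hx
  | cons k rest ih =>
    by_cases hxk : x = k
    · subst hxk
      have hxr : x ∉ rest := (List.nodup_cons.mp hnd).1
      have htw : (x :: rest).takeWhile (fun k => k ≠ x) = ([] : List Int) := by
        simp [List.takeWhile]
      rw [htw]
      simp only [List.foldl_cons]
      rw [sstep_fold_untouched best rest _ _ x hxr]
      simp only [sstep]
      rw [PySem.Dict.get?_insert, if_pos rfl]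
      simp [omax]
    · have hxr : x ∈ rest := by
        rcases List.mem_cons.mp hx with h | h
        · exact absurd h hxk
        · exact h
      have htw : (k :: rest).takeWhile (fun k => k ≠ x) = k :: rest.takeWhile (fun k => k ≠ x) := by
        have hne : decide (k = x) = false := decide_eq_false (fun h => hxk (Eq.symm h))
        simp [List.takeWhile, hne]
      rw [htw]
      simp only [List.foldl_cons]
      rw [ih (List.nodup_cons.mp hnd).2 _ _ hxr]
      simp only [sstep, List.map_cons]
      rfl

theorem takeWhile_mem_iff (ks : List Int) (hpw : ks.Pairwise (fun a b => b < a))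
    (x : Int) (hx : x ∈ ks) (k : Int) :
    k ∈ ks.takeWhile (fun k => k ≠ x) ↔ (k ∈ ks ∧ x < k) := by
  induction ks with
  | nil => cases hx
  | cons k0 rest ih =>
    have hall : ∀ b ∈ rest, b < k0 := fun b hb => (List.pairwise_cons.mp hpw).1 b hb
    by_cases hxk : x = k0
    · subst hxk
      have : (x :: rest).takeWhile (fun k => k ≠ x) = ([] : List Int) := by
        simp [List.takeWhile]
      rw [this]
      simp only [List.not_mem_nil, false_iff]
      rintro ⟨hk, hlt⟩
      rcases List.mem_cons.mp hk with rfl | hk'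
      · omega
      · have := hall _ hk'
        omega
    · have hxr : x ∈ rest := by
        rcases List.mem_cons.mp hx with h | h
        · exact absurd h hxk
        · exact h
      have hxlt : x < k0 := hall _ hxr
      have : (k0 :: rest).takeWhile (fun k => k ≠ x) = k0 :: rest.takeWhile (fun k => k ≠ x) := by
        have hne : decide (k0 = x) = false := decide_eq_false (fun h => hxk (Eq.symm h))
        simp [List.takeWhile, hne]
      rw [this]
      rw [List.mem_cons, ih (List.pairwise_cons.mp hpw).2 hxr]
      constructor
      · rintro (rfl | ⟨hk, hlt⟩)
        · exact ⟨List.mem_cons_self, hxlt⟩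
        · exact ⟨List.mem_cons_of_mem _ hk, hlt⟩
      · rintro ⟨hk, hlt⟩
        rcases List.mem_cons.mp hk with rfl | hk'
        · exact Or.inl rfl
        · exact Or.inr ⟨hk', hlt⟩

-- loop-shape lemmas for the two output folds
theorem foldl_skip_filter {α : Type} (p : α → Bool) (l : List α) (acc : List α) :
    l.foldl (fun acc x => if p x then acc else acc ++ [x]) acc = acc ++ l.filter (fun x => !p x) := by
  induction l generalizing acc with
  | nil => simp
  | cons v t ih => cases hp : p v <;> simp [hp, ih, List.append_assoc]

theorem foldl_keep_filter {α : Type} (p : α → Bool) (l : List α) (acc : List α) :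
    l.foldl (fun acc x => if p x then acc ++ [x] else acc) acc = acc ++ l.filter p := by
  induction l generalizing acc with
  | nil => simp
  | cons v t ih => cases hp : p v <;> simp [hp, ih, List.append_assoc]

-- names for the pieces of port B
def rngOf (recalls : List Int) : List Int := PySem.List.pyRange 0 (recalls.length : Int) 1
def grpOf (recalls qps_values : List Int) (x : Int) : List Int :=
  ((rngOf recalls).filter (fun i => pvGetI recalls i = x)).map (pvGetI qps_values)
def ksOf (recalls qps_values : List Int) : List Int :=
  PySem.List.sorted (bestOf recalls qps_values).keys (fun x => x) true
def strictOf (recalls qps_values : List Int) : PySem.Dict Int (Option Int) :=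
  ((ksOf recalls qps_values).foldl (sstep (bestOf recalls qps_values)) (PySem.Dict.empty, none)).1

theorem mem_grpOf (recalls qps_values : List Int) (x u : Int) :
    u ∈ grpOf recalls qps_values x
      ↔ ∃ j, j ∈ rngOf recalls ∧ pvGetI recalls j = x ∧ pvGetI qps_values j = u := by
  simp only [grpOf, List.mem_map, List.mem_filter, decide_eq_true_eq]
  constructor
  · rintro ⟨j, ⟨hj, hr⟩, hq⟩; exact ⟨j, hj, hr, hq⟩
  · rintro ⟨j, hj, hr, hq⟩; exact ⟨j, ⟨hj, hr⟩, hq⟩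

theorem bestOf_get?_grp (recalls qps_values : List Int) (x : Int) :
    (bestOf recalls qps_values).get? x = omax none (grpOf recalls qps_values x) := by
  rw [bestOf_get?]; rfl

theorem key_best (recalls qps_values : List Int) (x : Int)
    (hx : ∃ j, j ∈ rngOf recalls ∧ pvGetI recalls j = x) :
    ∃ v, (bestOf recalls qps_values).get? x = some v ∧
      (∃ j, j ∈ rngOf recalls ∧ pvGetI recalls j = x ∧ pvGetI qps_values j = v) ∧
      (∀ j, j ∈ rngOf recalls → pvGetI recalls j = x → pvGetI qps_values j ≤ v) := by
  obtain ⟨j, hj, hrj⟩ := hx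
  have hmem : pvGetI qps_values j ∈ grpOf recalls qps_values x :=
    (mem_grpOf recalls qps_values x _).mpr ⟨j, hj, hrj, rfl⟩
  rw [bestOf_get?_grp]
  cases hv : omax none (grpOf recalls qps_values x) with
  | none =>
    exfalso
    have h := (omax_eq_none_iff none (grpOf recalls qps_values x)).mp hv
    rw [h.2] at hmem
    cases hmem
  | some v =>
    refine ⟨v, rfl, ?_, ?_⟩
    · rcases omax_attained _ _ _ hv with h | h
      · exact absurd h (by simp)
      · obtain ⟨j', hj', hr', hq'⟩ := (mem_grpOf recalls qps_values x v).mp h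
        exact ⟨j', hj', hr', hq'⟩
    · intro j' hj' hr'
      exact omax_le _ _ _ hv _ ((mem_grpOf recalls qps_values x _).mpr ⟨j', hj', hr', rfl⟩)

theorem mem_keys_bestOf (recalls qps_values : List Int) (x : Int) :
    x ∈ (bestOf recalls qps_values).keys ↔ ∃ j, j ∈ rngOf recalls ∧ pvGetI recalls j = x := by
  constructor
  · intro h
    by_contra hno
    have hnone : (bestOf recalls qps_values).get? x = none := by
      rw [bestOf_get?_grp, omax_eq_none_iff]
      refine ⟨rfl, ?_⟩
      cases hg : grpOf recalls qps_values x with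
      | nil => rfl
      | cons u t =>
        exfalso
        have hu : u ∈ grpOf recalls qps_values x := by rw [hg]; exact List.mem_cons_self
        obtain ⟨j, hj, hr, _⟩ := (mem_grpOf recalls qps_values x u).mp hu
        exact hno ⟨j, hj, hr⟩
    exact ((PySem.Dict.get?_eq_none_iff_not_mem_keys _ _).mp hnone) h
  · intro hx
    obtain ⟨v, hv, _, _⟩ := key_best recalls qps_values x hx
    by_contra hk
    rw [(PySem.Dict.get?_eq_none_iff_not_mem_keys _ _).mpr hk] at hv
    cases hv

theorem ksOf_mem (recalls qps_values : List Int) (x : Int) :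
    x ∈ ksOf recalls qps_values ↔ x ∈ (bestOf recalls qps_values).keys := by
  exact PySem.List.mem_sorted _ _ _ _

theorem ksOf_nodup (recalls qps_values : List Int) : (ksOf recalls qps_values).Nodup := by
  have hp : (ksOf recalls qps_values).Perm (bestOf recalls qps_values).keys :=
    PySem.List.sorted_perm _ _ _
  exact hp.nodup_iff.mpr (bestOf_nodup_keys recalls qps_values)

theorem ksOf_pairwise (recalls qps_values : List Int) :
    (ksOf recalls qps_values).Pairwise (fun a b => b < a) := by
  have h1 : (ksOf recalls qps_values).Pairwise (fun a b => b ≤ a) :=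
    PySem.List.sorted_pairwise_rev _ _
  have h2 : (ksOf recalls qps_values).Pairwise (fun a b => a ≠ b) := ksOf_nodup recalls qps_values
  exact (h1.and h2).imp (fun h => by omega)

theorem strictOf_getD (recalls qps_values : List Int) (x : Int)
    (hx : x ∈ ksOf recalls qps_values) :
    (strictOf recalls qps_values).getD x none
      = omax none (((ksOf recalls qps_values).takeWhile (fun k => k ≠ x)).map
          (fun k => (bestOf recalls qps_values).getD k 0)) := by
  rw [strictOf, PySem.Dict.getD_eq_get?_getD,
    sstep_fold_get? _ _ (ksOf_nodup recalls qps_values) _ _ _ hx]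
  rfl

theorem pointwise (recalls qps_values : List Int) (i : Int) (hi : i ∈ rngOf recalls) :
    ((rngOf recalls).any (fun j =>
        decide (i ≠ j) &&
        ((decide (pvGetI recalls j ≥ pvGetI recalls i) && decide (pvGetI qps_values j > pvGetI qps_values i)) ||
         (decide (pvGetI recalls j > pvGetI recalls i) && decide (pvGetI qps_values j ≥ pvGetI qps_values i)))) = false)
    ↔ ((pvGetI qps_values i == (bestOf recalls qps_values).getD (pvGetI recalls i) 0 &&
       (match (strictOf recalls qps_values).getD (pvGetI recalls i) none with
        | none => true
        | some mv => decide (pvGetI qps_values i > mv))) = true) := by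
  have hx : ∃ j, j ∈ rngOf recalls ∧ pvGetI recalls j = pvGetI recalls i := ⟨i, hi, rfl⟩
  obtain ⟨v, hv, ⟨j0, hj0, hrj0, hqj0⟩, hbound⟩ := key_best recalls qps_values _ hx
  have hgetD : (bestOf recalls qps_values).getD (pvGetI recalls i) 0 = v :=
    PySem.Dict.getD_of_get?_eq_some _ 0 hv
  have hkey : pvGetI recalls i ∈ (bestOf recalls qps_values).keys :=
    (mem_keys_bestOf recalls qps_values _).mpr hx
  have hks : pvGetI recalls i ∈ ksOf recalls qps_values :=
    (ksOf_mem recalls qps_values _).mpr hkey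
  have hstrict := strictOf_getD recalls qps_values _ hks
  have hA : ((rngOf recalls).any (fun j =>
        decide (i ≠ j) &&
        ((decide (pvGetI recalls j ≥ pvGetI recalls i) && decide (pvGetI qps_values j > pvGetI qps_values i)) ||
         (decide (pvGetI recalls j > pvGetI recalls i) && decide (pvGetI qps_values j ≥ pvGetI qps_values i)))) = false)
      ↔ ((∀ j, j ∈ rngOf recalls → pvGetI recalls j = pvGetI recalls i → pvGetI qps_values j ≤ pvGetI qps_values i) ∧
         (∀ j, j ∈ rngOf recalls → pvGetI recalls i < pvGetI recalls j → pvGetI qps_values j < pvGetI qps_values i)) := by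
    rw [List.any_eq_false]
    constructor
    · intro H
      constructor
      · intro j hj hrj
        by_cases hij : j = i
        · subst hij; exact le_refl _
        · have h := H j hj
          simp only [Bool.and_eq_true, Bool.or_eq_true, decide_eq_true_eq, not_and, not_or] at h
          omega
      · intro j hj hlt
        have h := H j hj
        simp only [Bool.and_eq_true, Bool.or_eq_true, decide_eq_true_eq, not_and, not_or] at h
        by_cases hij : j = i
        · subst hij; omega
        · omega
    · rintro ⟨C1, C2⟩ j hj
      simp only [Bool.and_eq_true, Bool.or_eq_true, decide_eq_true_eq, not_and, not_or]
      intro hij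
      by_cases hr : pvGetI recalls j = pvGetI recalls i
      · have := C1 j hj hr
        omega
      · by_cases hlt : pvGetI recalls i < pvGetI recalls j
        · have := C2 j hj hlt
          omega
        · omega
  have hB1 : ((pvGetI qps_values i == (bestOf recalls qps_values).getD (pvGetI recalls i) 0) = true)
      ↔ (∀ j, j ∈ rngOf recalls → pvGetI recalls j = pvGetI recalls i → pvGetI qps_values j ≤ pvGetI qps_values i) := by
    rw [hgetD, beq_iff_eq]
    constructor
    · intro he j hj hrj
      have := hbound j hj hrj
      omega
    · intro C1
      have h1 := hbound i hi rfl
      have h2 := C1 j0 hj0 hrj0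
      omega
  have hB2 : ((match (strictOf recalls qps_values).getD (pvGetI recalls i) none with
        | none => true
        | some mv => decide (pvGetI qps_values i > mv)) = true)
      ↔ (∀ j, j ∈ rngOf recalls → pvGetI recalls i < pvGetI recalls j → pvGetI qps_values j < pvGetI qps_values i) := by
    rw [hstrict]
    cases hs : omax none (((ksOf recalls qps_values).takeWhile (fun k => k ≠ pvGetI recalls i)).map
        (fun k => (bestOf recalls qps_values).getD k 0)) with
    | none =>
      simp only [true_iff]
      intro j hj hlt
      exfalso
      have hkj : pvGetI recalls j ∈ ksOf recalls qps_values :=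
        (ksOf_mem recalls qps_values _).mpr ((mem_keys_bestOf recalls qps_values _).mpr ⟨j, hj, rfl⟩)
      have htwj : pvGetI recalls j ∈ (ksOf recalls qps_values).takeWhile (fun k => k ≠ pvGetI recalls i) :=
        (takeWhile_mem_iff _ (ksOf_pairwise recalls qps_values) _ hks _).mpr ⟨hkj, hlt⟩
      have h := (omax_eq_none_iff _ _).mp hs
      rw [List.map_eq_nil_iff.mp h.2] at htwj
      cases htwj
    | some mv =>
      simp only [decide_eq_true_eq]
      constructor
      · intro hgt j hj hlt
        have hkj : pvGetI recalls j ∈ ksOf recalls qps_values :=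
          (ksOf_mem recalls qps_values _).mpr ((mem_keys_bestOf recalls qps_values _).mpr ⟨j, hj, rfl⟩)
        have htwj : pvGetI recalls j ∈ (ksOf recalls qps_values).takeWhile (fun k => k ≠ pvGetI recalls i) :=
          (takeWhile_mem_iff _ (ksOf_pairwise recalls qps_values) _ hks _).mpr ⟨hkj, hlt⟩
        have hb := omax_le _ _ _ hs _ (List.mem_map_of_mem htwj)
        obtain ⟨w, hw, _, hwb⟩ := key_best recalls qps_values (pvGetI recalls j) ⟨j, hj, rfl⟩
        have hgdw : (bestOf recalls qps_values).getD (pvGetI recalls j) 0 = w :=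
          PySem.Dict.getD_of_get?_eq_some _ 0 hw
        have := hwb j hj rfl
        omega
      · intro C2
        rcases omax_attained _ _ _ hs with h | h
        · exact absurd h (by simp)
        · obtain ⟨k0, hk0tw, hk0b⟩ := List.mem_map.mp h
          obtain ⟨hk0ks, hk0lt⟩ :=
            (takeWhile_mem_iff _ (ksOf_pairwise recalls qps_values) _ hks _).mp hk0tw
          have hk0ex : ∃ j, j ∈ rngOf recalls ∧ pvGetI recalls j = k0 :=
            (mem_keys_bestOf recalls qps_values _).mp ((ksOf_mem recalls qps_values _).mp hk0ks)
          obtain ⟨w, hw, ⟨j1, hj1, hrj1, hqj1⟩, _⟩ := key_best recalls qps_values k0 hk0ex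
          have hgdw : (bestOf recalls qps_values).getD k0 0 = w :=
            PySem.Dict.getD_of_get?_eq_some _ 0 hw
          have := C2 j1 hj1 (by omega)
          omega
  rw [hA, Bool.and_eq_true, hB1, hB2]

-- ===== VERDICT (by name: the statement is the Claim_ definition above) =====
theorem compute_pareto_frontier_spec : Claim_equal_compute_pareto_frontier := by
  intro recalls qps_values _ _
  unfold Spec_compute_pareto_frontier
  have hAf : compute_pareto_frontier recalls qps_values
      = (rngOf recalls).filter (fun i => !((rngOf recalls).any (fun j =>
          decide (i ≠ j) &&
          ((decide (pvGetI recalls j ≥ pvGetI recalls i) && decide (pvGetI qps_values j > pvGetI qps_values i)) ||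
           (decide (pvGetI recalls j > pvGetI recalls i) && decide (pvGetI qps_values j ≥ pvGetI qps_values i)))))) := by
    rw [show compute_pareto_frontier recalls qps_values
        = (rngOf recalls).foldl (fun acc i =>
            if ((rngOf recalls).any (fun j =>
              decide (i ≠ j) &&
              ((decide (pvGetI recalls j ≥ pvGetI recalls i) && decide (pvGetI qps_values j > pvGetI qps_values i)) ||
               (decide (pvGetI recalls j > pvGetI recalls i) && decide (pvGetI qps_values j ≥ pvGetI qps_values i)))))
            then acc else acc ++ [i]) [] from rfl]
    rw [foldl_skip_filter]
    rfl
  have hBf : compute_pareto_frontier_alt recalls qps_values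
      = (rngOf recalls).filter (fun i =>
          (pvGetI qps_values i == (bestOf recalls qps_values).getD (pvGetI recalls i) 0 &&
           (match (strictOf recalls qps_values).getD (pvGetI recalls i) none with
            | none => true
            | some mv => decide (pvGetI qps_values i > mv)))) := by
    rw [show compute_pareto_frontier_alt recalls qps_values
        = (rngOf recalls).foldl (fun acc i =>
            if (pvGetI qps_values i == (bestOf recalls qps_values).getD (pvGetI recalls i) 0 &&
               (match (strictOf recalls qps_values).getD (pvGetI recalls i) none with
                | none => true
                | some mv => decide (pvGetI qps_values i > mv)))
            then acc ++ [i] else acc) [] from rfl]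
    rw [foldl_keep_filter]
    rfl
  rw [hAf, hBf]
  apply List.filter_congr
  intro i hi
  have h := pointwise recalls qps_values i hi
  cases hA : ((rngOf recalls).any (fun j =>
      decide (i ≠ j) &&
      ((decide (pvGetI recalls j ≥ pvGetI recalls i) && decide (pvGetI qps_values j > pvGetI qps_values i)) ||
       (decide (pvGetI recalls j > pvGetI recalls i) && decide (pvGetI qps_values j ≥ pvGetI qps_values i))))) with
  | false =>
    rw [hA] at h
    simp only [Bool.not_false]
    exact (h.mp rfl).symm
  | true =>
    simp only [Bool.not_true]
    cases hB : ((pvGetI qps_values i == (bestOf recalls qps_values).getD (pvGetI recalls i) 0 &&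
       (match (strictOf recalls qps_values).getD (pvGetI recalls i) none with
        | none => true
        | some mv => decide (pvGetI qps_values i > mv)))) with
    | false => rfl
    | true =>
      exfalso
      have := h.mpr hB
      rw [hA] at this
      cases this
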